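-- pv_equiv track=rewrite | github.com/huy-tran-22/PTIT_PYTHON | PY01024.py | check
-- ===== SOURCE A (Python) =====
-- def check(s):
--     t = 0
--     for i in range (0, len(s)-1):
--         t += int(s[i])
--         if abs(int(s[i]) - int(s[i+1])) != 2:
--             return 0
--     t += int(s[len(s)-1])
--     if t % 10 != 0:
--         return 0
--     return 1
-- ===== SOURCE B (Python) =====
-- def check(s):
--     def tail_sum(d, rest):
--         # digit sum of d followed by rest, or None if some adjacent difference is not 2
--         if not rest:
--             return d
--         e = int(rest[0])
--         if abs(d - e) != 2:
--             return None
--         t = tail_sum(e, rest[1:])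
--         return None if t is None else d + t
--     t = tail_sum(int(s[0]), s[1:])
--     return 1 if t is not None and t % 10 == 0 else 0
-- ===== Notes on version B (the rewrite author's own statement) =====
-- stated objective: alternative
-- what changed: B replaces A's imperative index loop (running accumulator, lookahead s[i+1], early returns, separate trailing last-digit add) by a pure non-tail recursion that returns the digit sum as an Optional (None on a failing adjacent pair), summing on the way back up, with the mod-10 decision made once at the top; Pre_ excludes only inputs on which both raise (empty string: IndexError; a non-digit reached before any failing adjacent pair: ValueError).
-- outside the precondition, e.g. on check(''): A raises IndexError, B raises IndexError
import Mathlib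
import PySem

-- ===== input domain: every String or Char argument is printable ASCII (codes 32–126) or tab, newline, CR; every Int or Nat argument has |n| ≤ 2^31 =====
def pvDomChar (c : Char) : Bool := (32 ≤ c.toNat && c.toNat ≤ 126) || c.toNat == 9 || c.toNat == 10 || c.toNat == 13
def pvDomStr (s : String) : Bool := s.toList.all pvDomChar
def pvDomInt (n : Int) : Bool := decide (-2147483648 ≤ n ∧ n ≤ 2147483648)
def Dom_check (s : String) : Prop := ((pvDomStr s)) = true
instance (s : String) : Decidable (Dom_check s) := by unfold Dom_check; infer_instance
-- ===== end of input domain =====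

-- B replaces A's imperative index loop (accumulator, lookahead, early returns, trailing add)
-- by a pure non-tail recursion returning the digit sum as an Option (none on a failing pair),
-- with the mod-10 decision made once at the top.

-- int(c) for a single digit character (exact on digit characters; Pre_ guarantees every
-- character this value is compared or summed through is a digit)
def pyIntChar (c : Char) : Int := (c.toNat : Int) - 48

-- ===== PORT A =====
-- the for-loop of A: index i, accumulator t
def checkGo (d : List Char) (i : Nat) (t : Int) : Int :=
  if i < d.length - 1 then
    let t' := t + pyIntChar (d.getD i ' ')
    if (pyIntChar (d.getD i ' ') - pyIntChar (d.getD (i+1) ' ')).natAbs ≠ 2 then 0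
    else checkGo d (i+1) t'
  else
    let t' := t + pyIntChar (d.getD (d.length - 1) ' ')
    if PySem.Int.mod t' 10 ≠ 0 then 0 else 1
termination_by d.length - 1 - i

def check (s : String) : Int := checkGo s.toList 0 0

-- ===== PORT B =====
-- tail_sum of B: digit sum of d followed by rest, or none if some adjacent difference is not 2
def tailSum (d : Int) (rest : List Char) : Option Int :=
  match rest with
  | [] => some d
  | c :: tl =>
    let e := pyIntChar c
    if (d - e).natAbs ≠ 2 then none
    else match tailSum e tl with
      | none => none
      | some t => some (d + t)

-- int(s[0]) via getD: Pre_ guarantees s nonempty (Python raises IndexError on "")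
def check_alt (s : String) : Int :=
  match tailSum (pyIntChar (s.toList.getD 0 ' ')) (s.toList.drop 1) with
  | none => 0
  | some t => if PySem.Int.mod t 10 = 0 then 1 else 0

-- ===== PRECONDITION & SPEC =====
-- Pre_ holds exactly where the Python A returns: a nonempty string that either is all digits
-- or has a failing adjacent difference inside an all-digit prefix (so A returns 0 before
-- reaching the first non-digit); elsewhere A raises IndexError ("") or ValueError (non-digit).
def Pre_check (s : String) : Prop :=
  s.toList ≠ [] ∧
    (s.toList.all Char.isDigit = true ∨
      ∃ i < s.toList.length, i + 1 < s.toList.length ∧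
        (s.toList.take (i+2)).all Char.isDigit = true ∧
        (((s.toList.getD i ' ').toNat : Int) - ((s.toList.getD (i+1) ' ').toNat : Int)).natAbs ≠ 2)
instance (s : String) : Decidable (Pre_check s) := by unfold Pre_check; infer_instance
def pvWitness_check : String := "86420"

def Spec_check (s : String) (out : Int) : Prop := out = check_alt s
instance (s : String) (out : Int) : Decidable (Spec_check s out) := by unfold Spec_check; infer_instance

-- ===== CLAIM (what is proved, stated in full; the proofs are below) =====
def Claim_equal_check : Prop := ∀ (s : String), Dom_check s → Pre_check s → Spec_check s (check s)

-- ===== LEMMAS AND PROOFS =====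

-- loop invariant of A: checkGo from index i equals the zip/sum form on the dropped suffix
theorem checkGo_eq (d : List Char) (hd : d ≠ []) : ∀ (i : Nat) (t : Int), i ≤ d.length - 1 →
    checkGo d i t =
      if ((d.drop i).zip (d.drop (i+1))).any
          (fun p => (pyIntChar p.1 - pyIntChar p.2).natAbs ≠ 2) then 0
      else if PySem.Int.mod (t + ((d.drop i).map pyIntChar).sum) 10 = 0 then 1 else 0 := by
  intro i t hi
  have hn : 0 < d.length := List.length_pos_iff.mpr hd
  rcases lt_or_eq_of_le hi with h | h
  · have hi1 : i < d.length := by omega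
    have hi2 : i + 1 < d.length := by omega
    have e1 : d.drop i = d[i] :: d.drop (i+1) := List.drop_eq_getElem_cons hi1
    have e2 : d.drop (i+1) = d[i+1] :: d.drop (i+2) := List.drop_eq_getElem_cons hi2
    have ih := checkGo_eq d hd (i+1) (t + pyIntChar d[i]) (by omega)
    rw [checkGo]
    simp only [if_pos h, List.getD_eq_getElem d ' ' hi1, List.getD_eq_getElem d ' ' hi2]
    by_cases hf : (pyIntChar d[i] - pyIntChar d[i+1]).natAbs ≠ 2
    · rw [if_pos hf]
      rw [e1]
      conv_rhs => rw [e2]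
      simp only [List.zip_cons_cons, List.any_cons]
      rw [if_pos]
      simp only [decide_eq_true_eq, Bool.or_eq_true]
      exact Or.inl (by simpa using hf)
    · have hzf : (decide ((pyIntChar d[i] - pyIntChar d[i+1]).natAbs ≠ 2)) = false := by
        simpa using hf
      rw [if_neg hf, ih, e1, e2]
      simp only [List.zip_cons_cons, List.any_cons, hzf, Bool.false_or, List.map_cons,
        List.sum_cons, add_assoc]
      norm_num
  · rw [checkGo]
    rw [if_neg (by omega)]
    have hi1 : i < d.length := by omega
    have e1 : d.drop i = d[i] :: d.drop (i+1) := List.drop_eq_getElem_cons hi1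
    have e2 : d.drop (i+1) = [] := List.drop_eq_nil_of_le (by omega)
    rw [e1, e2]
    simp only [List.zip_nil_right, List.any_nil, Bool.false_eq_true, if_false,
      List.map_cons, List.map_nil, List.sum_cons, List.sum_nil, add_zero]
    rw [List.getD_eq_getElem d ' ' (show d.length - 1 < d.length by omega)]
    have : d[d.length - 1]'(by omega) = d[i]'hi1 := by congr 1; omega
    rw [this]
    by_cases hm : PySem.Int.mod (t + pyIntChar d[i]) 10 = 0
    · rw [if_neg (by simpa using hm), if_pos hm]
    · rw [if_pos hm, if_neg hm]
termination_by i => d.length - 1 - i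

-- characterisation of B's recursion: tailSum is the guarded digit sum
theorem tailSum_eq (rest : List Char) : ∀ (d : Int),
    tailSum d rest =
      if ((d :: rest.map pyIntChar).zip (rest.map pyIntChar)).any
          (fun p => (p.1 - p.2).natAbs ≠ 2) then none
      else some (d + (rest.map pyIntChar).sum) := by
  induction rest with
  | nil => intro d; simp [tailSum]
  | cons c tl ih =>
    intro d
    rw [tailSum]
    simp only [List.map_cons, List.zip_cons_cons, List.any_cons, List.sum_cons]
    by_cases hf : (d - pyIntChar c).natAbs ≠ 2
    · rw [if_pos hf]
      rw [if_pos]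
      simp only [decide_eq_true_eq, Bool.or_eq_true]
      exact Or.inl (by simpa using hf)
    · have hzf : (decide ((d - pyIntChar c).natAbs ≠ 2)) = false := by simpa using hf
      rw [if_neg hf, ih (pyIntChar c)]
      by_cases ha : ((pyIntChar c :: tl.map pyIntChar).zip (tl.map pyIntChar)).any
          (fun p => (p.1 - p.2).natAbs ≠ 2) = true
      · rw [if_pos ha]
        rw [if_pos (by simp only [hzf, Bool.false_or]; exact ha)]
      · rw [if_neg ha]
        rw [if_neg (by simp only [hzf, Bool.false_or]; exact ha)]

-- bridge: an any over character pairs is the same any over their digit values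
theorem zip_map_any (l1 : List Char) : ∀ (l2 : List Char),
    ((l1.zip l2).any (fun p => decide ((pyIntChar p.1 - pyIntChar p.2).natAbs ≠ 2)))
      = (((l1.map pyIntChar).zip (l2.map pyIntChar)).any
          (fun p => decide ((p.1 - p.2).natAbs ≠ 2))) := by
  induction l1 with
  | nil => intro l2; simp
  | cons a t ih =>
    intro l2
    cases l2 with
    | nil => simp
    | cons b u =>
      simp only [List.zip_cons_cons, List.any_cons, List.map_cons]
      rw [ih u]

-- ===== VERDICT (by name: the statement is the Claim_ definition above) =====
theorem check_spec : Claim_equal_check := by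
  intro s _ hpre
  unfold Spec_check check check_alt
  have hd : s.toList ≠ [] := hpre.1
  rw [checkGo_eq s.toList hd 0 0 (by omega)]
  simp only [List.drop_zero, zero_add]
  obtain ⟨c0, tl, e⟩ : ∃ c0 tl, s.toList = c0 :: tl := by
    cases h : s.toList with
    | nil => exact absurd h hd
    | cons a l => exact ⟨a, l, rfl⟩
  rw [e]
  simp only [List.getD_cons_zero, List.drop_succ_cons, List.drop_zero]
  rw [tailSum_eq]
  have hz := zip_map_any (c0 :: tl) tl
  simp only [List.map_cons] at hz
  by_cases ha : ((pyIntChar c0 :: tl.map pyIntChar).zip (tl.map pyIntChar)).any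
      (fun p => decide ((p.1 - p.2).natAbs ≠ 2)) = true
  · rw [if_pos (by rw [hz]; exact ha), if_pos ha]
  · rw [if_neg (by rw [hz]; exact ha), if_neg ha]
    simp only [List.map_cons, List.sum_cons]
    rfl
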